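-- pv_equiv track=rewrite | github.com/nv259/CodeDaily | 3827-count-monobit-integers/3827-count-monobit-integers.py | countMonobit
-- ===== SOURCE A (Python) =====
-- def countMonobit(n: int) -> int:
--     curr_val = 1
--     curr_bit = 1
--     ans = 0
--
--     while curr_val <= n:
--         ans += 1
--         curr_bit *= 2
--         curr_val = curr_val + curr_bit
--
--     return ans + 1
-- ===== SOURCE B (Python) =====
-- def countMonobit(n: int) -> int:
--     return max(n + 1, 1).bit_length()
-- ===== Notes on version B (the rewrite author's own statement) =====
-- stated objective: simpler
-- what changed: Replaces the doubling loop that counts the all-ones integers up to the bound with a single closed-form expression: the bit length of the successor, clamped to be positive.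
import Mathlib
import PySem

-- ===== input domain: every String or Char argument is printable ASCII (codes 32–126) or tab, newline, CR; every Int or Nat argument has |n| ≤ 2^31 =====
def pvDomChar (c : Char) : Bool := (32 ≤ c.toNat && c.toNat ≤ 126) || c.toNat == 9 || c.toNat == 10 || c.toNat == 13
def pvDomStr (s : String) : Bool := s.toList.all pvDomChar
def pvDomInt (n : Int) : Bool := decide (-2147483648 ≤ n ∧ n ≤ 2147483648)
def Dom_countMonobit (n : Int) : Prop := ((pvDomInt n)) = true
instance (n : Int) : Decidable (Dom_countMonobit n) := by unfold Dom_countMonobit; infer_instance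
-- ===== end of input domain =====

-- B changes: the doubling loop is replaced by the closed form max(n+1,1).bit_length() (objective: simpler).

-- ===== PORT A =====
-- the while-loop of A: state (curr_val, curr_bit, ans); the proof argument 0 < cb only
-- establishes termination (curr_bit is 1 and then doubled, so always positive in A).
def countMonobitLoop (n cv cb ans : Int) (hcb : 0 < cb) : Int :=
  if h : cv ≤ n then
    countMonobitLoop n (cv + cb * 2) (cb * 2) (ans + 1) (by omega)
  else ans
termination_by (n + 1 - cv).toNat
decreasing_by omega

def countMonobit (n : Int) : Int :=
  countMonobitLoop n 1 1 0 (by omega) + 1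

-- ===== PORT B =====
-- max(n+1,1).bit_length(): for a positive integer m, m.bit_length() = Nat.size m
def countMonobit_alt (n : Int) : Int := ((max (n + 1) 1).toNat.size : Int)

-- ===== PRECONDITION & SPEC =====
def Spec_countMonobit (n : Int) (out : Int) : Prop := out = countMonobit_alt n
instance (n : Int) (out : Int) : Decidable (Spec_countMonobit n out) := by unfold Spec_countMonobit; infer_instance

-- ===== CLAIM (what is proved, stated in full; the proofs are below) =====
def Claim_equal_countMonobit : Prop := ∀ (n : Int), Dom_countMonobit n → Spec_countMonobit n (countMonobit n)

-- ===== LEMMAS AND PROOFS =====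

-- The loop condition 2^(k+1)-1 ≤ n is equivalent to k+1 < Nat.size m for m = max(n+1,1)
lemma cond_iff (n : Int) (k : Nat) :
    ((2 : Int) ^ (k + 1) - 1 ≤ n) ↔ (k + 1 < (max (n + 1) 1).toNat.size) := by
  rw [Nat.lt_size]
  have h1 : (1 : Int) ≤ max (n + 1) 1 := le_max_right _ _
  have hm : ((max (n + 1) 1).toNat : Int) = max (n + 1) 1 :=
    Int.toNat_of_nonneg (by linarith)
  have key : (2 ^ (k + 1) ≤ (max (n + 1) 1).toNat) ↔ ((2 : Int) ^ (k + 1) ≤ max (n + 1) 1) := by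
    rw [← hm]; constructor <;> intro h <;> exact_mod_cast h
  have h2 : (2 : Int) ≤ 2 ^ (k + 1) := by
    calc (2 : Int) = 2 ^ 1 := by norm_num
    _ ≤ 2 ^ (k + 1) := by
      apply pow_le_pow_right₀ (by norm_num) (by omega)
  rw [key, le_max_iff]
  constructor
  · intro h; left; linarith
  · intro h
    rcases h with h' | h'
    · linarith
    · linarith

-- Loop characterisation: started at state (2^(k+1)-1, 2^k, ans), the loop returns
-- ans + (size m - (k+1)) with Nat truncated subtraction, m = max(n+1,1).
lemma loop_eq (n : Int) : ∀ j k ans (h : 0 < (2:Int)^k),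
    (max (n + 1) 1).toNat.size - (k + 1) = j →
    countMonobitLoop n ((2:Int) ^ (k + 1) - 1) ((2:Int) ^ k) ans h
      = ans + (j : Int) := by
  intro j
  induction j with
  | zero =>
    intro k ans h hj
    rw [countMonobitLoop]
    have : ¬ ((2 : Int) ^ (k + 1) - 1 ≤ n) := by
      rw [cond_iff]; omega
    simp [this]
  | succ j ih =>
    intro k ans h hj
    rw [countMonobitLoop]
    have hc : (2 : Int) ^ (k + 1) - 1 ≤ n := by
      rw [cond_iff]; omega
    have e2 : (2:Int) ^ k * 2 = (2:Int) ^ (k + 1) := by ring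
    rw [dif_pos hc]
    have hrec := ih (k + 1) (ans + 1) (by positivity) (by omega)
    simp only [e2]
    rw [show (2:Int) ^ (k + 1) - 1 + (2:Int) ^ (k + 1) = (2:Int) ^ (k + 1 + 1) - 1 from by ring]
    rw [hrec]
    push_cast
    ring

theorem countMonobit_spec : Claim_equal_countMonobit := by
  intro n _
  unfold Spec_countMonobit countMonobit countMonobit_alt
  have hsz : 1 ≤ (max (n + 1) 1).toNat.size := by
    have hm : 0 < (max (n + 1) 1).toNat := by omega
    exact Nat.size_pos.2 hm
  have h0 : countMonobitLoop n 1 1 0 (by omega) =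
      (0 : Int) + (((max (n + 1) 1).toNat.size - 1 : Nat) : Int) := by
    have := loop_eq n ((max (n + 1) 1).toNat.size - (0 + 1)) 0 0
      (by norm_num) rfl
    simpa using this
  rw [h0]
  omega
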